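-- pv_equiv track=rewrite | github.com/aweinstock314/clemency-asm | asm/bits.py | bits2nytes
-- ===== SOURCE A (Python) =====
-- def bits2nytes(bits):
--     ret = []
--     l = len(bits)
--     l -= l % 9
--     for i in range(0, l, 9):
--         tmp = 0
--         for j in range(9):
--             tmp += bits[i+j] << (8-j)
--         ret.append(tmp)
--     return ret
-- ===== SOURCE B (Python) =====
-- def bits2nytes(bits):
--     ret = []
--     tmp = 0
--     cnt = 0
--     for b in bits:
--         tmp = tmp * 2 + b
--         cnt += 1
--         if cnt == 9:
--             ret.append(tmp)
--             tmp = 0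
--             cnt = 0
--     return ret
-- ===== Notes on version B (the rewrite author's own statement) =====
-- stated objective: simpler
-- what changed: Replaced the index-based nested loops (outer range stepping by 9, inner shift-and-add over a 9-window) with a single pass over the bits keeping a Horner accumulator tmp = tmp*2 + b and a counter that emits and resets every 9 bits; trailing partial groups are naturally dropped.
import Mathlib
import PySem

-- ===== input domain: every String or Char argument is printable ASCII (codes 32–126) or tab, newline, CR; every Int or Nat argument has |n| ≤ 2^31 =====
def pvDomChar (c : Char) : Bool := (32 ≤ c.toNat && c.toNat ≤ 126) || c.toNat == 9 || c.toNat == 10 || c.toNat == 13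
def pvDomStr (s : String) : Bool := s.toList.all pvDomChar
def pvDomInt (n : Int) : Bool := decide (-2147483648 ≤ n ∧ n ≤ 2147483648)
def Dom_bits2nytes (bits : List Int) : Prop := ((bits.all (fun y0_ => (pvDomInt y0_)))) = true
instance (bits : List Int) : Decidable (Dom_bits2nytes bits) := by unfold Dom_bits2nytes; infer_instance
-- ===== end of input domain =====

-- B replaces A's index-based nested loops by a single pass with a Horner accumulator and a bit counter (objective: simpler); same O(n) cost.


-- ===== PORT A =====
-- literal transliteration of A; bits[i+j] is always in range (i+j < l <= len), ported
-- as pyGetD with default 0 (never used); 'x << n' ported as 'x <<< n.toNat' (8-j >= 0 here)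

def bits2nytes (bits : List Int) : List Int :=
  let l : Int := (bits.length : Int)
  let l : Int := l - PySem.Int.mod l 9
  (PySem.List.pyRange 0 l 9).foldl
    (fun ret i =>
      ret ++ [(PySem.List.pyRange 0 9 1).foldl
        (fun tmp j => tmp + (PySem.List.pyGetD bits (i + j) 0) <<< (8 - j).toNat) 0])
    []

-- ===== PORT B =====
-- transliteration of Source B: one pass, Horner accumulator tmp and 9-counter cnt
def altGo : List Int → Int → Nat → List Int
  | [], _, _ => []
  | b :: rest, tmp, cnt =>
    let tmp' := tmp * 2 + b
    if cnt + 1 = 9 then tmp' :: altGo rest 0 0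
    else altGo rest tmp' (cnt + 1)

def bits2nytes_alt (bits : List Int) : List Int := altGo bits 0 0


-- ===== PRECONDITION & SPEC =====
def Spec_bits2nytes (bits : List Int) (out : List Int) : Prop := out = bits2nytes_alt bits
instance (bits : List Int) (out : List Int) : Decidable (Spec_bits2nytes bits out) := by unfold Spec_bits2nytes; infer_instance

-- ===== CLAIM (what is proved, stated in full; the proofs are below) =====
def Claim_equal_bits2nytes : Prop := ∀ (bits : List Int), Dom_bits2nytes bits → Spec_bits2nytes bits (bits2nytes bits)

-- ===== LEMMAS AND PROOFS =====
def inner9 (bits : List Int) (i : Int) : Int :=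
  (PySem.List.pyRange 0 9 1).foldl
    (fun tmp j => tmp + (PySem.List.pyGetD bits (i + j) 0) <<< (8 - j).toNat) 0

lemma pyGetD_cons_succ' (a : Int) (xs : List Int) (k : Int) (hk : 0 ≤ k) (d : Int) :
    PySem.List.pyGetD (a :: xs) (k + 1) d = PySem.List.pyGetD xs k d := by
  rw [PySem.List.pyGetD_of_nonneg (a :: xs) d (by omega),
      PySem.List.pyGetD_of_nonneg xs d hk,
      show (k + 1).toNat = k.toNat + 1 by omega, List.getD_cons_succ]

lemma inner9_shift (a : Int) (xs : List Int) (i : Int) (hi : 0 ≤ i) :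
    inner9 (a :: xs) (i + 1) = inner9 xs i := by
  have hr : PySem.List.pyRange 0 9 1 = [0,1,2,3,4,5,6,7,8] := by decide
  simp only [inner9, hr, List.foldl]
  have h : ∀ j : Int, 0 ≤ j →
      PySem.List.pyGetD (a :: xs) (i + 1 + j) 0 = PySem.List.pyGetD xs (i + j) 0 := by
    intro j hj
    rw [show i + 1 + j = (i + j) + 1 by ring, pyGetD_cons_succ' a xs (i + j) (by omega)]
  rw [h 0 (by norm_num), h 1 (by norm_num), h 2 (by norm_num), h 3 (by norm_num),
      h 4 (by norm_num), h 5 (by norm_num), h 6 (by norm_num), h 7 (by norm_num),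
      h 8 (by norm_num)]

lemma A_char (bits : List Int) :
    bits2nytes bits
      = (List.range (bits.length / 9)).map (fun m : Nat => inner9 bits (9 * (m : Int))) := by
  unfold bits2nytes
  dsimp only
  rw [PySem.List.pyRange_of_pos _ _ (by norm_num : (0:Int) < 9)]
  rw [List.foldl_map, PySem.List.foldl_append_singleton_eq_map]
  simp only [List.nil_append]
  rw [show PySem.Int.mod ((bits.length : Nat) : Int) 9 = ((bits.length % 9 : Nat) : Int) from by
        exact_mod_cast PySem.Int.mod_natCast bits.length 9]
  set n := bits.length with hn
  rw [show ((n : Int) - ((n % 9 : Nat) : Int)) = ((9 * (n / 9) : Nat) : Int) from by omega]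
  by_cases hq : n / 9 = 0
  · simp [hq]
  · rw [if_pos (by omega : (0:Int) < ((9 * (n / 9) : Nat) : Int))]
    rw [show ((((9 * (n / 9) : Nat) : Int) - 0 + 9 - 1) / 9).toNat = n / 9 by omega]
    apply List.map_congr_left
    intro m hm
    simp [inner9]

lemma inner9_head (a1 a2 a3 a4 a5 a6 a7 a8 a9 : Int) (xs : List Int) :
    inner9 (a1::a2::a3::a4::a5::a6::a7::a8::a9::xs) 0 =
      (((((((a1*2+a2)*2+a3)*2+a4)*2+a5)*2+a6)*2+a7)*2+a8)*2+a9 := by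
  have hr : PySem.List.pyRange 0 9 1 = [0,1,2,3,4,5,6,7,8] := by decide
  simp only [inner9, hr, List.foldl]
  norm_num [PySem.List.pyGetD_ofNat', Int.shiftLeft_eq,
    show ((8:Int)).toNat = 8 from rfl, show ((7:Int)).toNat = 7 from rfl,
    show ((6:Int)).toNat = 6 from rfl, show ((5:Int)).toNat = 5 from rfl,
    show ((4:Int)).toNat = 4 from rfl, show ((3:Int)).toNat = 3 from rfl,
    show ((2:Int)).toNat = 2 from rfl]
  ring

theorem key : ∀ (bits : List Int), bits2nytes bits = altGo bits 0 0
  | [] => by rw [A_char]; simp [altGo]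
  | [_] => by rw [A_char]; simp [altGo]
  | [_,_] => by rw [A_char]; simp [altGo]
  | [_,_,_] => by rw [A_char]; simp [altGo]
  | [_,_,_,_] => by rw [A_char]; simp [altGo]
  | [_,_,_,_,_] => by rw [A_char]; simp [altGo]
  | [_,_,_,_,_,_] => by rw [A_char]; simp [altGo]
  | [_,_,_,_,_,_,_] => by rw [A_char]; simp [altGo]
  | [_,_,_,_,_,_,_,_] => by rw [A_char]; simp [altGo]
  | a1::a2::a3::a4::a5::a6::a7::a8::a9::xs => by
    have ih := key xs
    rw [A_char]
    have hlen : (a1::a2::a3::a4::a5::a6::a7::a8::a9::xs).length = xs.length + 9 := by simp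
    rw [hlen, show (xs.length + 9) / 9 = xs.length / 9 + 1 by omega,
        List.range_succ_eq_map, List.map_cons, List.map_map]
    have hshift : ∀ (m : Nat),
        inner9 (a1::a2::a3::a4::a5::a6::a7::a8::a9::xs) (9 * ((m : Int) + 1)) =
          inner9 xs (9 * (m : Int)) := by
      intro m
      have h0 : (0:Int) ≤ 9 * (m : Int) := by positivity
      rw [show (9:Int) * ((m:Int)+1) = (9*(m:Int)+8)+1 by ring,
          inner9_shift _ _ _ (by omega),
          show (9:Int)*(m:Int)+8 = (9*(m:Int)+7)+1 by ring, inner9_shift _ _ _ (by omega),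
          show (9:Int)*(m:Int)+7 = (9*(m:Int)+6)+1 by ring, inner9_shift _ _ _ (by omega),
          show (9:Int)*(m:Int)+6 = (9*(m:Int)+5)+1 by ring, inner9_shift _ _ _ (by omega),
          show (9:Int)*(m:Int)+5 = (9*(m:Int)+4)+1 by ring, inner9_shift _ _ _ (by omega),
          show (9:Int)*(m:Int)+4 = (9*(m:Int)+3)+1 by ring, inner9_shift _ _ _ (by omega),
          show (9:Int)*(m:Int)+3 = (9*(m:Int)+2)+1 by ring, inner9_shift _ _ _ (by omega),
          show (9:Int)*(m:Int)+2 = (9*(m:Int)+1)+1 by ring, inner9_shift _ _ _ (by omega),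
          show (9:Int)*(m:Int)+1 = (9*(m:Int))+1 by ring, inner9_shift _ _ _ h0]
    have hmap :
        (List.map ((fun m : Nat => inner9 (a1::a2::a3::a4::a5::a6::a7::a8::a9::xs) (9 * (m : Int))) ∘ Nat.succ)
          (List.range (xs.length / 9)))
          = List.map (fun m : Nat => inner9 xs (9 * (m : Int))) (List.range (xs.length / 9)) := by
      apply List.map_congr_left
      intro m _
      simp only [Function.comp, Nat.succ_eq_add_one, Nat.cast_add, Nat.cast_one]
      exact hshift m
    rw [hmap, ← A_char xs, ih]
    simp only [altGo, reduceIte]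
    congr 1
    rw [show (9 * ((0:Nat):Int)) = 0 by simp, inner9_head]
    ring

-- ===== VERDICT (by name: the statement is the Claim_ definition above) =====
theorem bits2nytes_spec : Claim_equal_bits2nytes := by
  intro bits _
  unfold Spec_bits2nytes bits2nytes_alt
  exact key bits
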